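-- pv_equiv track=rewrite | github.com/dkaimekin/PP2_Retake | TSIS4/w2d2_zb.py | beat
-- ===== SOURCE A (Python) =====
-- def beat(bishopF, figureF):
--     if bishopF[0] > figureF[0]:         # Case when x of the bishop is greater than x of the figure
--         if bishopF[1] > figureF[1]:     # Case when y of the bishop is greater than y of the figure
--             cycles = bishopF[0] - figureF[0]
--             for i in range(cycles):
--                 bishopF[0] -= 1
--                 bishopF[1] -= 1
--                 if bishopF[0] == figureF[0] and bishopF[1] == figureF[1]:
--                     return True
--                 elif bishopF[0] == figureF[0] and bishopF[1] != figureF[1] \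
--                         or bishopF[0] != figureF[0] and bishopF[1] == figureF[1]:
--                     return False
--         elif bishopF[1] < figureF[1]:
--             cycles = bishopF[0] - figureF[0]
--             for i in range(cycles):
--                 bishopF[0] -= 1
--                 bishopF[1] += 1
--                 if bishopF[0] == figureF[0] and bishopF[1] == figureF[1]:
--                     return True
--                 elif bishopF[0] == figureF[0] and bishopF[1] != figureF[1] \
--                         or bishopF[0] != figureF[0] and bishopF[1] == figureF[1]:
--                     return False
--
--     elif bishopF[0] < figureF[0]:       # Case when x of the figure is greater than x of the bishop
--         if bishopF[1] < figureF[1]:     # Case when y of the figure is greater than y of the bishop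
--             cycles = figureF[0] - bishopF[0]
--             for i in range(cycles):
--                 bishopF[0] += 1
--                 bishopF[1] += 1
--                 if bishopF[0] == figureF[0] and bishopF[1] == figureF[1]:
--                     return True
--                 elif bishopF[0] == figureF[0] and bishopF[1] != figureF[1] \
--                         or bishopF[0] != figureF[0] and bishopF[1] == figureF[1]:
--                     return False
--         elif bishopF[1] > figureF[1]:
--             cycles = figureF[0] - bishopF[0]
--             for i in range(cycles):
--                 bishopF[0] += 1
--                 bishopF[1] -= 1
--                 if bishopF[0] == figureF[0] and bishopF[1] == figureF[1]:
--                     return True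
--                 elif bishopF[0] == figureF[0] and bishopF[1] != figureF[1] \
--                         or bishopF[0] != figureF[0] and bishopF[1] == figureF[1]:
--                     return False
--     else:
--         return False
-- ===== SOURCE B (Python) =====
-- def beat(bishopF, figureF):
--     dx = bishopF[0] - figureF[0]
--     dy = bishopF[1] - figureF[1]
--     return dx != 0 and abs(dx) == abs(dy)
-- ===== Notes on version B (the rewrite author's own statement) =====
-- stated objective: simpler
-- what changed: Replaces A's step-by-step walk of the bishop along the diagonal (a loop of |dx| iterations, mutating the bishop's coordinates in place) with the closed-form arithmetic test dx != 0 and |dx| == |dy|. Pre_ excludes coordinate lists with fewer than two entries: Python indexing raises IndexError there, except that A happens to return False before touching index 1 when the two x-coordinates tie, an accident of branch order.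
-- intended difference: On inputs where the x-coordinates differ but the y-coordinates are equal, A falls off a branch with no else and returns None; B returns False, the intended answer, since a bishop on the same rank but a different file cannot attack the figure. — e.g. on beat([1, 0], [0, 0]): A returns none, B returns some false
-- outside the precondition, e.g. on beat([0], [0]): A returns False, B raises IndexError; on beat([3], [3, 1]): A returns False, B raises IndexError
import Mathlib
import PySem

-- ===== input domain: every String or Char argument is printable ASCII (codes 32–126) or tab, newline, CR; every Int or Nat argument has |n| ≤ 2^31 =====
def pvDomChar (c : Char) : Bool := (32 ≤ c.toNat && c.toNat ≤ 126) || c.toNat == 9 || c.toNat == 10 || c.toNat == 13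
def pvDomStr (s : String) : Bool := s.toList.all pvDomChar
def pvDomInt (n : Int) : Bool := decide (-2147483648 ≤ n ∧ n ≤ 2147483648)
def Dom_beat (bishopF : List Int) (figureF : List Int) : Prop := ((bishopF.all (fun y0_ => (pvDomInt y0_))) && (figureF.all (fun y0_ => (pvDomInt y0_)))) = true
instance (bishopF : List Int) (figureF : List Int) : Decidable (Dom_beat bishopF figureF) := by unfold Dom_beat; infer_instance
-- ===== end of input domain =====

-- B replaces A's step-by-step diagonal walk (a loop of |dx| iterations, which also MUTATES
-- bishopF in place — the equivalence proved here is about the RETURN value only; B does not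
-- mutate) with the closed-form test dx ≠ 0 ∧ |dx| = |dy|; objective: simpler. Where the x's
-- differ but the y's tie, A returns None by accident and B returns False (stated in D_beat).


-- ===== PORT A =====
-- A's four copies of the walking loop, parametrised only by the per-step increments
-- (the Python body of each loop is identical up to the signs of the two updates):
-- state = the bishop's mutated coordinates, fuel = range(cycles).
def beatWalk (fx fy sx sy : Int) : Nat → Int → Int → Option Bool
  | 0, _, _ => none            -- loop exhausted, Python falls off and returns None
  | Nat.succ n, bx, b1 =>
    let bx' := bx + sx
    let b1' := b1 + sy
    if bx' = fx ∧ b1' = fy then some true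
    else if (bx' = fx ∧ b1' ≠ fy) ∨ (bx' ≠ fx ∧ b1' = fy) then some false
    else beatWalk fx fy sx sy n bx' b1'

def beat (bishopF : List Int) (figureF : List Int) : Option Bool :=
  match PySem.List.pyGet? bishopF 0, PySem.List.pyGet? bishopF 1,
        PySem.List.pyGet? figureF 0, PySem.List.pyGet? figureF 1 with
  | some bx, some b1, some fx, some fy =>
    if bx > fx then
      if b1 > fy then beatWalk fx fy (-1) (-1) (bx - fx).toNat bx b1
      else if b1 < fy then beatWalk fx fy (-1) 1 (bx - fx).toNat bx b1
      else none
    else if bx < fx then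
      if b1 < fy then beatWalk fx fy 1 1 (fx - bx).toNat bx b1
      else if b1 > fy then beatWalk fx fy 1 (-1) (fx - bx).toNat bx b1
      else none
    else some false
  | _, _, _, _ => none         -- IndexError in Python; outside Pre_beat

-- ===== PORT B =====
def beat_alt (bishopF : List Int) (figureF : List Int) : Option Bool :=
  -- the two subtractions of Source B; a 'none' anywhere is IndexError (outside Pre_beat)
  (PySem.List.pyGet? bishopF 0).bind fun bx =>
  (PySem.List.pyGet? figureF 0).bind fun fx =>
  (PySem.List.pyGet? bishopF 1).bind fun b1 =>
  (PySem.List.pyGet? figureF 1).bind fun fy =>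
    some (decide (bx - fx ≠ 0) && decide ((bx - fx).natAbs = (b1 - fy).natAbs))

-- ===== PRECONDITION & SPEC =====
-- Pre_ excludes lists with fewer than two elements: there Python indexing raises IndexError
-- (except that A happens to return False before touching index 1 when the x-coordinates tie,
-- an accident of branch order; B raises there too).
def Pre_beat (bishopF : List Int) (figureF : List Int) : Prop :=
  2 ≤ bishopF.length ∧ 2 ≤ figureF.length
instance (bishopF : List Int) (figureF : List Int) : Decidable (Pre_beat bishopF figureF) := by
  unfold Pre_beat; infer_instance

def pvWitness_beat : List Int × List Int := ([0, 0], [2, 2])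

-- On inputs where the x-coordinates differ but the y-coordinates are equal, A falls off a
-- branch with no else and returns None; B returns False, the intended answer, since a bishop
-- on the same rank but a different file cannot attack the figure.
def D_beat (bishopF : List Int) (figureF : List Int) : Prop :=
  2 ≤ bishopF.length ∧ 2 ≤ figureF.length ∧
  bishopF.getD 0 0 ≠ figureF.getD 0 0 ∧ bishopF.getD 1 0 = figureF.getD 1 0
instance (bishopF : List Int) (figureF : List Int) : Decidable (D_beat bishopF figureF) := by
  unfold D_beat; infer_instance

def Spec_beat (bishopF : List Int) (figureF : List Int) (out : Option Bool) : Prop :=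
  ¬ D_beat bishopF figureF → out = beat_alt bishopF figureF
instance (bishopF : List Int) (figureF : List Int) (out : Option Bool) : Decidable (Spec_beat bishopF figureF out) := by unfold Spec_beat; infer_instance

def pvDiffWitness_beat : List Int × List Int := ([1, 0], [0, 0])
def pvDiffWitnessOut_beat : (Option Bool) × (Option Bool) := (none, some false)

-- ===== CLAIM (what is proved, stated in full; the proofs are below) =====
def Claim_unchanged_beat : Prop := ∀ (bishopF : List Int) (figureF : List Int), Dom_beat bishopF figureF → Pre_beat bishopF figureF → Spec_beat bishopF figureF (beat bishopF figureF)
def Claim_changed_beat : Prop := Dom_beat (pvDiffWitness_beat.1) (pvDiffWitness_beat.2) ∧ Pre_beat (pvDiffWitness_beat.1) (pvDiffWitness_beat.2) ∧ D_beat (pvDiffWitness_beat.1) (pvDiffWitness_beat.2) ∧ beat (pvDiffWitness_beat.1) (pvDiffWitness_beat.2) = pvDiffWitnessOut_beat.1 ∧ beat_alt (pvDiffWitness_beat.1) (pvDiffWitness_beat.2) = pvDiffWitnessOut_beat.2 ∧ pvDiffWitnessOut_beat.1 ≠ pvDiffWitnessOut_beat.2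
def Claim_exact_beat : Prop := ∀ (bishopF : List Int) (figureF : List Int), Dom_beat bishopF figureF → Pre_beat bishopF figureF → D_beat bishopF figureF → beat bishopF figureF ≠ beat_alt bishopF figureF

-- ===== LEMMAS AND PROOFS =====

-- Each of A's four loops, started with the exact fuel Python gives it, returns
-- some (|dx| = |dy|).  One lemma per sign pattern.
lemma walk_dd (fx fy : Int) : ∀ (n : Nat) (bx b1 : Int), bx - fx = n → fx < bx → fy < b1 →
    beatWalk fx fy (-1) (-1) n bx b1 = some (decide (bx - fx = b1 - fy)) := by
  intro n
  induction n with
  | zero => intro bx b1 h hx hy; omega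
  | succ n ih =>
    intro bx b1 h hx hy
    simp only [beatWalk]
    split_ifs with h1 h2
    · have : bx - fx = b1 - fy := by omega
      simp [this]
    · have : ¬ (bx - fx = b1 - fy) := by omega
      simp [this]
    · push_neg at h1 h2
      have hrec := ih (bx + -1) (b1 + -1) (by omega) (by omega) (by omega)
      rw [hrec]
      have : (bx + -1 - fx = b1 + -1 - fy) = (bx - fx = b1 - fy) := by
        apply propext; constructor <;> intro <;> omega
      simp only [this]

lemma walk_du (fx fy : Int) : ∀ (n : Nat) (bx b1 : Int), bx - fx = n → fx < bx → b1 < fy →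
    beatWalk fx fy (-1) 1 n bx b1 = some (decide (bx - fx = fy - b1)) := by
  intro n
  induction n with
  | zero => intro bx b1 h hx hy; omega
  | succ n ih =>
    intro bx b1 h hx hy
    simp only [beatWalk]
    split_ifs with h1 h2
    · have : bx - fx = fy - b1 := by omega
      simp [this]
    · have : ¬ (bx - fx = fy - b1) := by omega
      simp [this]
    · push_neg at h1 h2
      have hrec := ih (bx + -1) (b1 + 1) (by omega) (by omega) (by omega)
      rw [hrec]
      have : (bx + -1 - fx = fy - (b1 + 1)) = (bx - fx = fy - b1) := by
        apply propext; constructor <;> intro <;> omega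
      simp only [this]

lemma walk_uu (fx fy : Int) : ∀ (n : Nat) (bx b1 : Int), fx - bx = n → bx < fx → b1 < fy →
    beatWalk fx fy 1 1 n bx b1 = some (decide (fx - bx = fy - b1)) := by
  intro n
  induction n with
  | zero => intro bx b1 h hx hy; omega
  | succ n ih =>
    intro bx b1 h hx hy
    simp only [beatWalk]
    split_ifs with h1 h2
    · have : fx - bx = fy - b1 := by omega
      simp [this]
    · have : ¬ (fx - bx = fy - b1) := by omega
      simp [this]
    · push_neg at h1 h2
      have hrec := ih (bx + 1) (b1 + 1) (by omega) (by omega) (by omega)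
      rw [hrec]
      have : (fx - (bx + 1) = fy - (b1 + 1)) = (fx - bx = fy - b1) := by
        apply propext; constructor <;> intro <;> omega
      simp only [this]

lemma walk_ud (fx fy : Int) : ∀ (n : Nat) (bx b1 : Int), fx - bx = n → bx < fx → fy < b1 →
    beatWalk fx fy 1 (-1) n bx b1 = some (decide (fx - bx = b1 - fy)) := by
  intro n
  induction n with
  | zero => intro bx b1 h hx hy; omega
  | succ n ih =>
    intro bx b1 h hx hy
    simp only [beatWalk]
    split_ifs with h1 h2
    · have : fx - bx = b1 - fy := by omega
      simp [this]
    · have : ¬ (fx - bx = b1 - fy) := by omega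
      simp [this]
    · push_neg at h1 h2
      have hrec := ih (bx + 1) (b1 + -1) (by omega) (by omega) (by omega)
      rw [hrec]
      have : (fx - (bx + 1) = b1 + -1 - fy) = (fx - bx = b1 - fy) := by
        apply propext; constructor <;> intro <;> omega
      simp only [this]

lemma pyGet_one (x y : Int) (t : List Int) : PySem.List.pyGet? (x :: y :: t) 1 = some y := by
  have hone : (1 : Int) = ((1 : Nat) : Int) := by norm_num
  rw [hone, PySem.List.pyGet?_natCast]; rfl

-- ===== VERDICT (by name: the statement is the Claim_ definitions above) =====
theorem beat_spec : Claim_unchanged_beat := by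
  intro bishopF figureF _ hpre hnd
  obtain ⟨hb, hf⟩ := hpre
  match bishopF, figureF with
  | bx :: b1 :: bt, fx :: fy :: ft =>
    unfold D_beat at hnd
    simp only [List.getD_cons_zero, List.getD_cons_succ, List.length_cons] at hnd
    have hnd' : ¬ (bx ≠ fx ∧ b1 = fy) := by
      intro h; exact hnd ⟨by omega, by omega, h.1, h.2⟩
    unfold beat beat_alt
    rw [PySem.List.pyGet?_zero_cons, PySem.List.pyGet?_zero_cons, pyGet_one, pyGet_one]
    simp only [Option.bind_some]
    rcases lt_trichotomy fx bx with hx | hx | hx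
    · rcases lt_trichotomy fy b1 with hy | hy | hy
      · rw [if_pos hx, if_pos hy, walk_dd fx fy (bx - fx).toNat bx b1 (by omega) hx hy]
        have : (bx - fx = b1 - fy) = ((decide (bx - fx ≠ 0) && decide ((bx - fx).natAbs = (b1 - fy).natAbs)) = true) := by
          apply propext; constructor <;> simp <;> intro <;> omega
        simp only [this]; simp
      · exact absurd ⟨by omega, by omega⟩ hnd'
      · rw [if_pos hx, if_neg (by omega), if_pos hy,
            walk_du fx fy (bx - fx).toNat bx b1 (by omega) hx hy]
        have : (bx - fx = fy - b1) = ((decide (bx - fx ≠ 0) && decide ((bx - fx).natAbs = (b1 - fy).natAbs)) = true) := by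
          apply propext; constructor <;> simp <;> intro <;> omega
        simp only [this]; simp
    · rw [if_neg (by omega), if_neg (by omega)]
      have : (decide (bx - fx ≠ 0) && decide ((bx - fx).natAbs = (b1 - fy).natAbs)) = false := by
        simp; omega
      rw [this]
    · rcases lt_trichotomy fy b1 with hy | hy | hy
      · rw [if_neg (by omega), if_pos hx, if_neg (by omega), if_pos hy,
            walk_ud fx fy (fx - bx).toNat bx b1 (by omega) hx hy]
        have : (fx - bx = b1 - fy) = ((decide (bx - fx ≠ 0) && decide ((bx - fx).natAbs = (b1 - fy).natAbs)) = true) := by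
          apply propext; constructor <;> simp <;> intro <;> omega
        simp only [this]; simp
      · exact absurd ⟨by omega, by omega⟩ hnd'
      · rw [if_neg (by omega), if_pos hx, if_pos hy,
            walk_uu fx fy (fx - bx).toNat bx b1 (by omega) hx hy]
        have : (fx - bx = fy - b1) = ((decide (bx - fx ≠ 0) && decide ((bx - fx).natAbs = (b1 - fy).natAbs)) = true) := by
          apply propext; constructor <;> simp <;> intro <;> omega
        simp only [this]; simp

theorem beat_changed : Claim_changed_beat := by unfold Claim_changed_beat; decide

theorem beat_tight : Claim_exact_beat := by
  intro bishopF figureF _ hpre hd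
  obtain ⟨hb, hf⟩ := hpre
  match bishopF, figureF with
  | bx :: b1 :: bt, fx :: fy :: ft =>
    unfold D_beat at hd
    simp only [List.getD_cons_zero, List.getD_cons_succ] at hd
    obtain ⟨-, -, hdx, hdy⟩ := hd
    unfold beat beat_alt
    rw [PySem.List.pyGet?_zero_cons, PySem.List.pyGet?_zero_cons, pyGet_one, pyGet_one]
    simp only [Option.bind_some]
    rcases lt_trichotomy fx bx with hx | hx | hx
    · rw [if_pos hx, if_neg (by omega), if_neg (by omega)]
      simp
    · omega
    · rw [if_neg (by omega), if_pos hx, if_neg (by omega), if_neg (by omega)]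
      simp
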